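-- pv_equiv track=rewrite | github.com/sehunfromdaegu/pdf_ecg_extract | pdf_module.py | split_newline
-- ===== SOURCE A (Python) =====
-- def find_newline(str):
--     indices = [-1]
--     for i in range(len(str)):
--         if str[i] == '\n':
--             indices.append(i)
--     return indices
--
-- def split_newline(str):
--     list_of_str = []
--     indices = find_newline(str)
--     for i in range(len(indices)-1):
--         begin = indices[i] + 1
--         end = indices[i+1]
--         list_of_str.append(str[begin:end])
--
--     return list_of_str
-- ===== SOURCE B (Python) =====
-- def split_newline(str):
--     list_of_str = []
--     cur = []
--     for ch in str:
--         if ch == '\n':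
--             list_of_str.append(''.join(cur))
--             cur = []
--         else:
--             cur.append(ch)
--     return list_of_str
-- ===== Notes on version B (the rewrite author's own statement) =====
-- stated objective: simpler
-- what changed: A first builds a list of newline indices and then re-scans with index pairs and slicing; B makes one pass over the characters with a running character buffer, flushing it on each newline and never emitting the trailing segment.
import Mathlib
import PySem

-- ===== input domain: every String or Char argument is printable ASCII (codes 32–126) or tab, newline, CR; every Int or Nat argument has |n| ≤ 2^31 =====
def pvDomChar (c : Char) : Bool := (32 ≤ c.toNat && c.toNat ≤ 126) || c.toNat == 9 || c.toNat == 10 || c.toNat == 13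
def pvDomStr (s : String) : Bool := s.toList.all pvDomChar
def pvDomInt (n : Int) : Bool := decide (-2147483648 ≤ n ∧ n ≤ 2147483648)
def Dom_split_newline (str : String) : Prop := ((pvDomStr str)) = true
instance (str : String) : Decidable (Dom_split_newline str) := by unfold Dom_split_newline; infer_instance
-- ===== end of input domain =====

-- B replaces A's two passes (collect newline indices, then slice between index pairs) by one
-- pass with a running character buffer flushed at each newline; objective: simpler.

-- ===== PORT A =====
def find_newline (str : String) : List Int :=
  (PySem.List.pyRange 0 (PySem.Str.len str) 1).foldl
    (fun indices i => if PySem.Str.pyGet? str i = some '\n' then indices ++ [i] else indices)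
    [-1]

def split_newline (str : String) : List String :=
  let indices := find_newline str
  (PySem.List.pyRange 0 ((indices.length : Int) - 1) 1).foldl
    (fun list_of_str i =>
      let b := PySem.List.pyGetD indices i 0 + 1
      let e := PySem.List.pyGetD indices (i + 1) 0
      list_of_str ++ [PySem.Str.slice str (some b) (some e)])
    []

-- ===== PORT B =====
-- ''.join of a list of single-character strings is String.ofList of those characters (exact).
def splitGo : List Char → List Char → List String
  | [], _ => []
  | c :: t, cur =>
      if c = '\n' then String.ofList cur :: splitGo t [] else splitGo t (cur ++ [c])

def split_newline_alt (str : String) : List String := splitGo str.toList []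

-- ===== PRECONDITION & SPEC =====
def Spec_split_newline (str : String) (out : List String) : Prop := out = split_newline_alt str
instance (str : String) (out : List String) : Decidable (Spec_split_newline str out) := by unfold Spec_split_newline; infer_instance

-- ===== CLAIM (what is proved, stated in full; the proofs are below) =====
def Claim_equal_split_newline : Prop := ∀ (str : String), Dom_split_newline str → Spec_split_newline str (split_newline str)

-- ===== LEMMAS AND PROOFS =====

/-- Positions (0-based) of '\n' in a character list. -/
def pos : List Char → List Nat
  | [] => []
  | c :: t => if c = '\n' then 0 :: (pos t).map (· + 1) else (pos t).map (· + 1)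

/-- Reference splitter: segments strictly before each newline, trailing segment dropped. -/
def splitNL : List Char → List (List Char)
  | [] => []
  | c :: t =>
      if c = '\n' then [] :: splitNL t
      else match splitNL t with
           | [] => []
           | h :: r => (c :: h) :: r

/-- Segments of `cs` cut at the given (absolute) positions, starting at `a`. -/
def segsN (cs : List Char) : Nat → List Nat → List (List Char)
  | _, [] => []
  | a, n :: ns => ((cs.drop a).take (n - a)) :: segsN cs (n + 1) ns

theorem splitGo_eq (cs : List Char) :
    ∀ cur, splitGo cs cur =
      match splitNL cs with
      | [] => []
      | h :: r => String.ofList (cur ++ h) :: r.map String.ofList := by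
  induction cs with
  | nil => intro cur; simp [splitGo, splitNL]
  | cons c t ih =>
      intro cur
      by_cases hc : c = '\n'
      · cases h : splitNL t <;> simp [splitGo, splitNL, hc, ih, h]
      · cases h : splitNL t <;> simp [splitGo, splitNL, hc, ih, h]

theorem pos_nil_splitNL (cs : List Char) (h : pos cs = []) : splitNL cs = [] := by
  induction cs with
  | nil => simp [splitNL]
  | cons c t ih =>
      by_cases hc : c = '\n'
      · simp [pos, hc] at h
      · simp only [pos, if_neg hc, List.map_eq_nil_iff] at h
        simp [splitNL, hc, ih h]

theorem filter_range_eq_pos (cs : List Char) :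
    (List.range cs.length).filter (fun k => decide (cs[k]? = some '\n')) = pos cs := by
  induction cs with
  | nil => simp [pos]
  | cons c t ih =>
      rw [List.length_cons, List.range_succ_eq_map, List.filter_cons]
      rw [List.filter_map]
      have : (fun k => decide ((c :: t)[k]? = some '\n')) ∘ Nat.succ
           = fun k => decide (t[k]? = some '\n') := by
        funext k; simp
      rw [this, ih]
      by_cases hc : c = '\n'
      · simp [pos, hc]
      · simp [pos, hc]

theorem find_newline_eq (s : String) :
    find_newline s = -1 :: (pos s.toList).map (fun n : Nat => (n : Int)) := by
  unfold find_newline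
  rw [PySem.List.foldl_append_ite_eq_filter]
  have hlen : PySem.Str.len s = (s.toList.length : Int) := by simp [PySem.Str.len_eq]
  rw [hlen, PySem.List.pyRange_zero_natCast, List.filter_map]
  have : (fun i => decide (PySem.Str.pyGet? s i = some '\n')) ∘ (fun k : Nat => (k : Int))
       = fun k : Nat => decide (s.toList[k]? = some '\n') := by
    funext k; simp
  rw [this, filter_range_eq_pos]
  rfl

theorem segsN_shift (c : Char) (t : List Char) :
    ∀ (ns : List Nat) (a : Nat),
      segsN (c :: t) (a + 1) (ns.map (· + 1)) = segsN t a ns := by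
  intro ns
  induction ns with
  | nil => intro a; simp [segsN]
  | cons n rest ih =>
      intro a
      simp only [List.map_cons, segsN, List.drop_succ_cons]
      rw [Nat.add_sub_add_right]
      exact congrArg _ (ih (n + 1))

theorem segsN_pos (cs : List Char) : segsN cs 0 (pos cs) = splitNL cs := by
  induction cs with
  | nil => simp [pos, segsN, splitNL]
  | cons c t ih =>
      by_cases hc : c = '\n'
      · simp only [pos, if_pos hc, segsN, List.drop_zero, Nat.zero_sub, List.take_zero]
        rw [show (1 : Nat) = 0 + 1 from rfl, segsN_shift, ih]
        simp [splitNL, hc]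
      · simp only [pos, splitNL, if_neg hc]
        cases hp : pos t with
        | nil =>
            rw [pos_nil_splitNL t hp]
            simp [segsN]
        | cons n rest =>
            rw [← ih]
            simp only [hp, List.map_cons, segsN, List.drop_zero, Nat.sub_zero,
              List.take_succ_cons]
            rw [show n + 1 + 1 = (n + 1) + 1 from rfl, segsN_shift]

/-- The Str slice with natural-number bounds is take/drop of the character list. -/
theorem str_slice_natCast (s : String) (a b : Nat) :
    PySem.Str.slice s (some (a : Int)) (some (b : Int))
      = String.ofList ((s.toList.drop a).take (b - a)) := by
  apply String.toList_injective
  simp [PySem.Str.toList_slice, PySem.Chars.slice_eq_listSlice, PySem.List.slice_natCast]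

theorem range_map_slices (s : String) :
    ∀ (ms : List Nat) (a : Nat) (p : Int), p + 1 = (a : Int) →
      (List.range ms.length).map (fun j =>
        PySem.Str.slice s
          (some ((p :: ms.map (fun n : Nat => (n : Int))).getD j 0 + 1))
          (some ((p :: ms.map (fun n : Nat => (n : Int))).getD (j + 1) 0)))
      = (segsN s.toList a ms).map String.ofList := by
  intro ms
  induction ms with
  | nil => intro a p _; simp [segsN]
  | cons n rest ih =>
      intro a p hp
      rw [List.length_cons, List.range_succ_eq_map, List.map_cons, List.map_map]
      have h0 : (p :: (n :: rest).map (fun n : Nat => (n : Int))).getD 0 0 + 1 = (a : Int) := by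
        simpa using hp
      have h1 : (p :: (n :: rest).map (fun n : Nat => (n : Int))).getD 1 0 = ((n : Nat) : Int) := by
        simp
      rw [h0, h1, str_slice_natCast]
      have htail : ∀ j : Nat,
          (p :: (n :: rest).map (fun n : Nat => (n : Int))).getD (j + 1) 0
          = (((n : Nat) : Int) :: rest.map (fun n : Nat => (n : Int))).getD j 0 := by
        intro j
        cases j with
        | zero => simp
        | succ j => simp
      have hbody : (fun j => PySem.Str.slice s
            (some ((p :: (n :: rest).map (fun n : Nat => (n : Int))).getD j 0 + 1))
            (some ((p :: (n :: rest).map (fun n : Nat => (n : Int))).getD (j + 1) 0))) ∘ Nat.succ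
          = fun j => PySem.Str.slice s
            (some ((((n : Nat) : Int) :: rest.map (fun n : Nat => (n : Int))).getD j 0 + 1))
            (some ((((n : Nat) : Int) :: rest.map (fun n : Nat => (n : Int))).getD (j + 1) 0)) := by
        funext j
        simp only [Function.comp_apply, Nat.succ_eq_add_one]
        rw [htail j, htail (j + 1)]
      rw [hbody, ih (n + 1) ((n : Nat) : Int) (by push_cast; ring)]
      simp [segsN]

theorem split_newline_eq (s : String) :
    split_newline s = (segsN s.toList 0 (pos s.toList)).map String.ofList := by
  unfold split_newline
  rw [find_newline_eq]
  rw [PySem.List.foldl_append_singleton_eq_map, List.nil_append]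
  have hlen : (((-1 : Int) :: (pos s.toList).map (fun n : Nat => (n : Int))).length : Int) - 1
      = (((pos s.toList).length : Nat) : Int) := by
    simp only [List.length_cons, List.length_map]
    push_cast; ring
  rw [hlen, PySem.List.pyRange_zero_natCast, List.map_map]
  rw [← range_map_slices s (pos s.toList) 0 (-1) (by norm_num)]
  apply List.map_congr_left
  intro j hj
  simp only [Function.comp_apply]
  have h1 : PySem.List.pyGetD ((-1 : Int) :: (pos s.toList).map (fun n : Nat => (n : Int))) ((j : Nat) : Int) 0
      = ((-1 : Int) :: (pos s.toList).map (fun n : Nat => (n : Int))).getD j 0 :=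
    PySem.List.pyGetD_natCast _ _ _
  have h2 : PySem.List.pyGetD ((-1 : Int) :: (pos s.toList).map (fun n : Nat => (n : Int))) (((j : Nat) : Int) + 1) 0
      = ((-1 : Int) :: (pos s.toList).map (fun n : Nat => (n : Int))).getD (j + 1) 0 := by
    have hc : ((j : Nat) : Int) + 1 = (((j + 1 : Nat) : Nat) : Int) := by push_cast; ring
    rw [hc, PySem.List.pyGetD_natCast]
  rw [h1, h2]

-- ===== VERDICT (by name: the statement is the Claim_ definition above) =====
theorem split_newline_spec : Claim_equal_split_newline := by
  intro s _
  unfold Spec_split_newline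
  rw [split_newline_eq, segsN_pos]
  unfold split_newline_alt
  rw [splitGo_eq]
  cases h : splitNL s.toList with
  | nil => simp
  | cons hd r => simp
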